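-- pv_equiv track=rewrite | github.com/mkiiim/icloudBotGPT | icloudBotGPT.py | update_response_queue
-- ===== SOURCE A (Python) =====
-- def update_response_queue(new_messages):
--     """ identify the unique groups of message senders / chat groups in the new messages
--         that are not from the assistant and return a list of tuples with the following format:
--         (row_id, is_from_me, handle_id, chat_id)
--         where row_id is the first message of each group of messages from the same conversation
--     """
--     response_queue = []
--     for message in new_messages:
--         row_id = message[7]
--         is_from_me = message[5]
--         handle_id = message[0]
--         chat_id = message[6]
--         if (handle_id and not chat_id) or (handle_id and chat_id) or (not handle_id and chat_id):
--             response_queue.append((row_id, is_from_me, handle_id, chat_id))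
--
--     # remove duplicates where key is (handle_id and chat_id)
--     seen = {}
--     new_response_queue = []
--     for item in response_queue[::-1]:
--         if (item[2], item[3]) not in seen:
--             new_response_queue.append(item)
--             seen[(item[2], item[3])] = True
--     response_queue = new_response_queue[::-1]
--
--     # remove duplicates where key is (chat_id)
--     seen = {}
--     new_response_queue = []
--     for item in response_queue[::-1]:
--         if item[3] not in seen or item[3] is None:
--             new_response_queue.append(item)
--             seen[item[3]] = True
--     response_queue = new_response_queue[::-1]
--
--     # remove any records where is_from_me is 1
--     for i in range(len(response_queue)-1, -1, -1):
--         if response_queue[i][1] == 1: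
--             response_queue.pop(i)
--
--     return response_queue
-- ===== SOURCE B (Python) =====
-- def update_response_queue(new_messages):
--     """Same queue as A, built with a single combined reverse dedup pass."""
--     filtered = [(m[7], m[5], m[0], m[6]) for m in new_messages if m[0] or m[6]]
--     seen_pair = {}
--     seen_chat = {}
--     kept = []
--     for item in reversed(filtered):
--         row_id, is_from_me, handle_id, chat_id = item
--         if (handle_id, chat_id) in seen_pair:
--             continue
--         seen_pair[(handle_id, chat_id)] = True
--         if chat_id is None or chat_id not in seen_chat:
--             kept.append(item)
--             seen_chat[chat_id] = True
--     kept.reverse()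
--     return [t for t in kept if t[1] != 1]
-- ===== Notes on version B (the rewrite author's own statement) =====
-- stated objective: alternative
-- what changed: B replaces A's two sequential keep-last dedup passes (each with its own seen dict and double reversal) by one combined reverse pass maintaining both seen dicts at once, and replaces A's backward index/pop removal loop by a filter.
import Mathlib
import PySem

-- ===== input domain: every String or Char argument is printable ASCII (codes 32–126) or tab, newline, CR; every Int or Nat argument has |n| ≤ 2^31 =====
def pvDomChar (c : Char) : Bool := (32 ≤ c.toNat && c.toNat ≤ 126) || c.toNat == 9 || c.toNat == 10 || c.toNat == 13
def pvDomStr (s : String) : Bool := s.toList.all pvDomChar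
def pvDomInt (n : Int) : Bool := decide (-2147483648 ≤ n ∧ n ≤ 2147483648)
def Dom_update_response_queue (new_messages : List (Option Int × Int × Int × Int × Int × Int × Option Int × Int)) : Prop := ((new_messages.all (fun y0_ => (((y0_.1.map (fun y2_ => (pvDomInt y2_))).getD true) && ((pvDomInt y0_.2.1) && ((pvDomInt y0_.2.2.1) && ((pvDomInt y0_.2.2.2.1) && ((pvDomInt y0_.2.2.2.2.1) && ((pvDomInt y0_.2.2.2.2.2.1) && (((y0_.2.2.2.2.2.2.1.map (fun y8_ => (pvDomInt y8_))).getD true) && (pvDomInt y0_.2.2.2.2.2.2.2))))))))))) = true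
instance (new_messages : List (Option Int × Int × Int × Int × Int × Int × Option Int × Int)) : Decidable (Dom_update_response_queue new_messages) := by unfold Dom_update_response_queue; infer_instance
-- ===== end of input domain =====

-- B folds A's two sequential keep-last dedup passes into one combined reverse pass with
-- two seen-dicts, and replaces the backward index/pop removal loop with a filter (alternative decomposition).

-- ===== PORT A =====

-- Python truthiness of an Optional[int]: None and 0 are falsy.
def pvTruthy (o : Option Int) : Bool :=
  match o with
  | none => false
  | some v => v != 0

-- pass 1: 'for item in response_queue[::-1]: if (item[2],item[3]) not in seen: append; seen[...]=True'
def pvAPass1 (seen : PySem.Dict (Option Int × Option Int) Bool)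
    (acc : List (Int × Int × Option Int × Option Int)) :
    List (Int × Int × Option Int × Option Int) → List (Int × Int × Option Int × Option Int)
  | [] => acc
  | item :: rest =>
    if !(seen.contains (item.2.2.1, item.2.2.2)) then
      pvAPass1 (seen.insert (item.2.2.1, item.2.2.2) true) (acc ++ [item]) rest
    else pvAPass1 seen acc rest

-- pass 2: 'if item[3] not in seen or item[3] is None: append; seen[item[3]]=True'
def pvAPass2 (seen : PySem.Dict (Option Int) Bool)
    (acc : List (Int × Int × Option Int × Option Int)) :
    List (Int × Int × Option Int × Option Int) → List (Int × Int × Option Int × Option Int)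
  | [] => acc
  | item :: rest =>
    if !(seen.contains item.2.2.2) || item.2.2.2.isNone then
      pvAPass2 (seen.insert item.2.2.2 true) (acc ++ [item]) rest
    else pvAPass2 seen acc rest

def update_response_queue (new_messages : List (Option Int × Int × Int × Int × Int × Int × Option Int × Int)) : List (Int × Int × Option Int × Option Int) :=
  -- first loop: build response_queue by appending
  let response_queue :=
    new_messages.foldl (fun acc message =>
      let row_id := message.2.2.2.2.2.2.2
      let is_from_me := message.2.2.2.2.2.1
      let handle_id := message.1
      let chat_id := message.2.2.2.2.2.2.1
      if (pvTruthy handle_id && !pvTruthy chat_id) || (pvTruthy handle_id && pvTruthy chat_id)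
          || (!pvTruthy handle_id && pvTruthy chat_id) then
        acc ++ [(row_id, is_from_me, handle_id, chat_id)]
      else acc) []
  -- dedup on (handle_id, chat_id); '[::-1]' is slice?; step -1 ≠ 0 so getD never fires
  let response_queue :=
    ((PySem.List.slice? (pvAPass1 PySem.Dict.empty []
        ((PySem.List.slice? response_queue none none (-1)).getD [])) none none (-1)).getD [])
  -- dedup on chat_id
  let response_queue :=
    ((PySem.List.slice? (pvAPass2 PySem.Dict.empty []
        ((PySem.List.slice? response_queue none none (-1)).getD [])) none none (-1)).getD [])
  -- 'for i in range(len-1,-1,-1): if q[i][1]==1: q.pop(i)'; defaults never fire (i always in range)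
  (PySem.List.pyRange ((response_queue.length : Int) - 1) (-1) (-1)).foldl
    (fun q i =>
      if (PySem.List.pyGetD q i (0, 0, none, none)).2.1 == 1 then
        ((PySem.List.pop? q i).map (·.2)).getD q
      else q) response_queue

-- ===== PORT B =====

-- one combined reverse pass over the filtered queue, two seen-dicts
def pvComb (sp : PySem.Dict (Option Int × Option Int) Bool) (sc : PySem.Dict (Option Int) Bool)
    (acc : List (Int × Int × Option Int × Option Int)) :
    List (Int × Int × Option Int × Option Int) → List (Int × Int × Option Int × Option Int)
  | [] => acc
  | item :: rest =>
    if sp.contains (item.2.2.1, item.2.2.2) then pvComb sp sc acc rest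
    else
      let sp' := sp.insert (item.2.2.1, item.2.2.2) true
      if item.2.2.2.isNone || !(sc.contains item.2.2.2) then
        pvComb sp' (sc.insert item.2.2.2 true) (acc ++ [item]) rest
      else pvComb sp' sc acc rest

def update_response_queue_alt (new_messages : List (Option Int × Int × Int × Int × Int × Int × Option Int × Int)) : List (Int × Int × Option Int × Option Int) :=
  let filtered :=
    (new_messages.filter (fun m => pvTruthy m.1 || pvTruthy m.2.2.2.2.2.2.1)).map
      (fun m => (m.2.2.2.2.2.2.2, m.2.2.2.2.2.1, m.1, m.2.2.2.2.2.2.1))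
  let kept := pvComb PySem.Dict.empty PySem.Dict.empty [] filtered.reverse
  kept.reverse.filter (fun t => t.2.1 != 1)

-- ===== PRECONDITION & SPEC =====
def Spec_update_response_queue (new_messages : List (Option Int × Int × Int × Int × Int × Int × Option Int × Int)) (out : List (Int × Int × Option Int × Option Int)) : Prop := out = update_response_queue_alt new_messages
instance (new_messages : List (Option Int × Int × Int × Int × Int × Int × Option Int × Int)) (out : List (Int × Int × Option Int × Option Int)) : Decidable (Spec_update_response_queue new_messages out) := by unfold Spec_update_response_queue; infer_instance

-- ===== CLAIM (what is proved, stated in full; the proofs are below) =====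
def Claim_equal_update_response_queue : Prop := ∀ (new_messages : List (Option Int × Int × Int × Int × Int × Int × Option Int × Int)), Dom_update_response_queue new_messages → Spec_update_response_queue new_messages (update_response_queue new_messages)

-- ===== LEMMAS AND PROOFS =====

theorem pvAPass1_acc (seen) (acc : List (Int × Int × Option Int × Option Int)) (l) :
    pvAPass1 seen acc l = acc ++ pvAPass1 seen [] l := by
  induction l generalizing seen acc with
  | nil => simp [pvAPass1]
  | cons x rest ih =>
    simp only [pvAPass1]
    split
    · rw [ih _ (acc ++ [x]), ih _ ([] ++ [x])]; simp
    · exact ih _ _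

theorem pvAPass2_acc (seen) (acc : List (Int × Int × Option Int × Option Int)) (l) :
    pvAPass2 seen acc l = acc ++ pvAPass2 seen [] l := by
  induction l generalizing seen acc with
  | nil => simp [pvAPass2]
  | cons x rest ih =>
    simp only [pvAPass2]
    split
    · rw [ih _ (acc ++ [x]), ih _ ([] ++ [x])]; simp
    · exact ih _ _

theorem pvComb_acc (sp sc) (acc : List (Int × Int × Option Int × Option Int)) (l) :
    pvComb sp sc acc l = acc ++ pvComb sp sc [] l := by
  induction l generalizing sp sc acc with
  | nil => simp [pvComb]
  | cons x rest ih =>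
    simp only [pvComb]
    split
    · exact ih _ _ _
    · split
      · rw [ih _ _ (acc ++ [x]), ih _ _ ([] ++ [x])]; simp
      · exact ih _ _ _

-- the two sequential dedup passes equal the combined pass
theorem pvPass2_pass1_eq_comb (l) (sp : PySem.Dict (Option Int × Option Int) Bool)
    (sc : PySem.Dict (Option Int) Bool) :
    pvAPass2 sc [] (pvAPass1 sp [] l) = pvComb sp sc [] l := by
  induction l generalizing sp sc with
  | nil => rfl
  | cons x rest ih =>
    by_cases hp : sp.contains (x.2.2.1, x.2.2.2) = true
    · simp only [pvAPass1, pvComb, hp, Bool.not_true, Bool.false_eq_true, if_false, if_true]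
      exact ih _ _
    · simp only [Bool.not_eq_true] at hp
      simp only [pvAPass1, pvComb, hp, Bool.not_false, Bool.false_eq_true, if_false, if_true]
      rw [pvAPass1_acc _ ([] ++ [x])]
      simp only [List.nil_append, List.singleton_append, pvAPass2]
      by_cases hc : (!(sc.contains x.2.2.2) || x.2.2.2.isNone) = true
      · rw [if_pos hc,
          if_pos (by revert hc; cases sc.contains x.2.2.2 <;> cases x.2.2.2.isNone <;> simp)]
        rw [pvAPass2_acc, pvComb_acc, ih]
      · rw [if_neg hc,
          if_neg (by revert hc; cases sc.contains x.2.2.2 <;> cases x.2.2.2.isNone <;> simp)]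
        exact ih _ _

-- the backward index/pop removal loop is a filter
theorem pvRemove_eq_filter (q s : List (Int × Int × Option Int × Option Int)) :
    (PySem.List.pyRange ((q.length : Int) - 1) (-1) (-1)).foldl
      (fun q i =>
        if (PySem.List.pyGetD q i (0, 0, none, none)).2.1 == 1 then
          ((PySem.List.pop? q i).map (·.2)).getD q
        else q) (q ++ s)
    = q.filter (fun t => !(t.2.1 == 1)) ++ s := by
  induction q using List.reverseRecOn generalizing s with
  | nil => simp
  | append_singleton q0 a ih =>
    have hlen : ((q0 ++ [a]).length : Int) - 1 = (q0.length : Int) := by simp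
    rw [hlen, PySem.List.pyRange_neg_one_cons (by omega : (-1:Int) < (q0.length : Int))]
    have hget : PySem.List.pyGetD ((q0 ++ [a]) ++ s) ((q0.length : Int)) (0, 0, none, none) = a := by
      rw [PySem.List.pyGetD_natCast]
      rw [List.append_assoc]
      simp [List.getD_eq_getElem?_getD]
    have hpop : PySem.List.pop? ((q0 ++ [a]) ++ s) ((q0.length : Int)) = some (a, q0 ++ s) := by
      rw [List.append_assoc]
      rw [PySem.List.pop?_natCast (q0 ++ ([a] ++ s)) q0.length (by simp)]
      rw [Option.some_inj, Prod.mk.injEq]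
      refine ⟨by simp [List.getElem_append_right (le_refl q0.length)], ?_⟩
      simp [List.eraseIdx_append]
    simp only [List.foldl_cons, hget]
    by_cases ha : a.2.1 == 1
    · rw [if_pos ha]
      simp only [hpop, Option.map_some, Option.getD_some]
      rw [ih s]
      simp [List.filter_append, List.filter, ha]
    · rw [if_neg ha]
      rw [show (q0 ++ [a]) ++ s = q0 ++ ([a] ++ s) from List.append_assoc q0 [a] s]
      rw [ih ([a] ++ s)]
      simp [List.filter_append, List.filter, ha]

theorem pvRemove_eq_filter' (q : List (Int × Int × Option Int × Option Int)) :
    (PySem.List.pyRange ((q.length : Int) - 1) (-1) (-1)).foldl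
      (fun q i =>
        if (PySem.List.pyGetD q i (0, 0, none, none)).2.1 == 1 then
          ((PySem.List.pop? q i).map (·.2)).getD q
        else q) q
    = q.filter (fun t => !(t.2.1 == 1)) := by
  simpa using pvRemove_eq_filter q []

-- ===== VERDICT (by name: the statement is the Claim_ definition above) =====
theorem update_response_queue_spec : Claim_equal_update_response_queue := by
  intro nm _
  show update_response_queue nm = update_response_queue_alt nm
  unfold update_response_queue update_response_queue_alt
  simp only [PySem.List.slice?_none_none_neg_one, Option.getD_some]
  rw [PySem.List.foldl_append_if
        (fun (m : Option Int × Int × Int × Int × Int × Int × Option Int × Int) =>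
          (pvTruthy m.1 && !pvTruthy m.2.2.2.2.2.2.1) || (pvTruthy m.1 && pvTruthy m.2.2.2.2.2.2.1)
          || (!pvTruthy m.1 && pvTruthy m.2.2.2.2.2.2.1))
        (fun m => (m.2.2.2.2.2.2.2, m.2.2.2.2.2.1, m.1, m.2.2.2.2.2.2.1)) nm []]
  have hp : ∀ m : Option Int × Int × Int × Int × Int × Int × Option Int × Int,
      ((pvTruthy m.1 && !pvTruthy m.2.2.2.2.2.2.1) || (pvTruthy m.1 && pvTruthy m.2.2.2.2.2.2.1)
        || (!pvTruthy m.1 && pvTruthy m.2.2.2.2.2.2.1))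
      = (pvTruthy m.1 || pvTruthy m.2.2.2.2.2.2.1) := by
    intro m; cases pvTruthy m.1 <;> cases pvTruthy m.2.2.2.2.2.2.1 <;> rfl
  simp only [List.nil_append, hp]
  rw [List.reverse_reverse, pvPass2_pass1_eq_comb]
  rw [pvRemove_eq_filter' _]
  simp [bne]
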